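-- pv_equiv track=rewrite | github.com/OkayHmm/3P71_2025_A1 | my_attempt_a1.py | scale_with_colour_map
-- ===== SOURCE A (Python) =====
-- def scale_with_colour_map(grid, scale_factor, colour_map):
--     colour_map = dict(colour_map)
--     new_grid = []
--     for row in grid:
--         # Create scale_factor rows for each original row
--         for _ in range(scale_factor):
--             new_row = []
--             for cell in row:
--                 # Map color and repeat scale_factor times
--                 mapped_color = colour_map.get(cell, cell)
--                 new_row.extend([mapped_color] * scale_factor)
--             new_grid.append(new_row)
--     return new_grid
-- ===== SOURCE B (Python) =====
-- def scale_with_colour_map(grid, scale_factor, colour_map):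
--     # Index-based construction: every output cell (i, j) is computed directly
--     # from its source cell grid[i // s][j // s]; no replication anywhere.
--     cm = dict(colour_map)
--     s = scale_factor
--     out = []
--     for i in range(len(grid) * s):
--         src = grid[i // s]
--         out.append([cm.get(src[j // s], src[j // s]) for j in range(len(src) * s)])
--     return out
-- ===== Notes on version B (the rewrite author's own statement) =====
-- stated objective: alternative
-- what changed: replaced A's replication-based construction (repeat each cell and each row scale_factor times) by an index-based one: B iterates over output coordinates and computes every output cell directly as the colour-mapped grid[i//s][j//s], with no replication anywhere
import Mathlib
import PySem

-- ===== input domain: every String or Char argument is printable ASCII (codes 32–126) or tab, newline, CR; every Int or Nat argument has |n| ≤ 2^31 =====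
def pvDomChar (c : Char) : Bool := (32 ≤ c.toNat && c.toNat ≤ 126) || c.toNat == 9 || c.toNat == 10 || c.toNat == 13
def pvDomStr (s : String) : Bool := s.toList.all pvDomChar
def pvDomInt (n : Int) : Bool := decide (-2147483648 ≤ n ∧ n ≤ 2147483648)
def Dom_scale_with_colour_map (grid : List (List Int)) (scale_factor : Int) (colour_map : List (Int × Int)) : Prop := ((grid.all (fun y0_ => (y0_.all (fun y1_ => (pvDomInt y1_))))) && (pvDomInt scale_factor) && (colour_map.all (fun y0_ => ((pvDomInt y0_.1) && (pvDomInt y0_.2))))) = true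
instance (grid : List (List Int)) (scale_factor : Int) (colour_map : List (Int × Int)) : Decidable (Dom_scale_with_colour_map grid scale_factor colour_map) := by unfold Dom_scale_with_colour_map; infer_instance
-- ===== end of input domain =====

-- ===== PORT A =====
-- B rebuilds the scaled grid by output coordinates (out[i][j] = mapped grid[i//s][j//s]) instead of A's replication (objective: alternative).
def scale_with_colour_map (grid : List (List Int)) (scale_factor : Int) (colour_map : List (Int × Int)) : List (List Int) :=
  let cm := PySem.Dict.ofList colour_map
  grid.foldl (fun new_grid row =>
    -- for _ in range(scale_factor): build new_row and append it
    (List.replicate scale_factor.toNat ()).foldl (fun new_grid _ =>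
      let new_row := row.foldl (fun new_row cell =>
        new_row ++ List.replicate scale_factor.toNat (cm.getD cell cell)) []
      new_grid ++ [new_row]) new_grid) []

-- ===== PORT B =====
-- the pyGetD defaults are never used: i//s and j//s are always in range when the range is nonempty (then s ≥ 1)
def scale_with_colour_map_alt (grid : List (List Int)) (scale_factor : Int) (colour_map : List (Int × Int)) : List (List Int) :=
  let cm := PySem.Dict.ofList colour_map
  let s := scale_factor
  (PySem.List.pyRange 0 ((grid.length : Int) * s) 1).map (fun i =>
    let src := PySem.List.pyGetD grid (PySem.Int.floordiv i s) []
    (PySem.List.pyRange 0 ((src.length : Int) * s) 1).map (fun j =>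
      let c := PySem.List.pyGetD src (PySem.Int.floordiv j s) 0
      cm.getD c c))

-- ===== PRECONDITION & SPEC =====
def Spec_scale_with_colour_map (grid : List (List Int)) (scale_factor : Int) (colour_map : List (Int × Int)) (out : List (List Int)) : Prop := out = scale_with_colour_map_alt grid scale_factor colour_map
instance (grid : List (List Int)) (scale_factor : Int) (colour_map : List (Int × Int)) (out : List (List Int)) : Decidable (Spec_scale_with_colour_map grid scale_factor colour_map out) := by unfold Spec_scale_with_colour_map; infer_instance

-- ===== CLAIM (what is proved, stated in full; the proofs are below) =====
def Claim_equal_scale_with_colour_map : Prop := ∀ (grid : List (List Int)) (scale_factor : Int) (colour_map : List (Int × Int)), Dom_scale_with_colour_map grid scale_factor colour_map → Spec_scale_with_colour_map grid scale_factor colour_map (scale_with_colour_map grid scale_factor colour_map)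

-- ===== LEMMAS AND PROOFS =====

-- A-side loop shapes
lemma row_fold_eq (k : Nat) (f : Int → Int) (row : List Int) (acc : List Int) :
    row.foldl (fun nr c => nr ++ List.replicate k (f c)) acc
      = acc ++ row.flatMap (fun c => List.replicate k (f c)) := by
  induction row generalizing acc with
  | nil => simp
  | cons x xs ih => simp [ih]

lemma rep_fold_eq {α : Type} (n : Nat) (r : α) (acc : List α) :
    (List.replicate n ()).foldl (fun ng _ => ng ++ [r]) acc = acc ++ List.replicate n r := by
  induction n generalizing acc with
  | zero => simp
  | succ m ih => simp [List.replicate_succ, ih]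

lemma grid_fold_eq (n : Nat) (g : List Int → List Int) (grid : List (List Int)) (acc : List (List Int)) :
    grid.foldl (fun ng row => (List.replicate n ()).foldl (fun ng' _ => ng' ++ [g row]) ng) acc
      = acc ++ grid.flatMap (fun row => List.replicate n (g row)) := by
  induction grid generalizing acc with
  | nil => simp
  | cons r rs ih => rw [List.foldl_cons, rep_fold_eq, ih]; simp [List.flatMap_cons]

-- Nat core of the index/division argument: reading position k/sn of L for k < |L|*sn
-- enumerates each element sn times in order.
lemma key_nat {α β : Type} [Inhabited α] (g : α → β) (sn : Nat) (hs : 0 < sn) (d : α) :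
    ∀ (L : List α),
    (List.range (L.length * sn)).map (fun k => g (L.getD (k / sn) d))
      = L.flatMap (fun c => List.replicate sn (g c)) := by
  intro L
  induction L with
  | nil => simp
  | cons x xs ih =>
    have hlen : (x :: xs).length * sn = sn + xs.length * sn := by
      simp [List.length_cons]; ring
    rw [hlen, List.range_add, List.map_append, List.map_map]
    have h1 : (List.range sn).map (fun k => g ((x :: xs).getD (k / sn) d))
        = List.replicate sn (g x) := by
      rw [List.eq_replicate_iff]
      refine ⟨by simp, ?_⟩
      intro b hb
      obtain ⟨k, hk, rfl⟩ := List.mem_map.mp hb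
      have hk' : k < sn := List.mem_range.mp hk
      have : k / sn = 0 := Nat.div_eq_of_lt hk'
      simp [this]
    have h2 : (List.range (xs.length * sn)).map ((fun k => g ((x :: xs).getD (k / sn) d)) ∘ (fun k => sn + k))
        = xs.flatMap (fun c => List.replicate sn (g c)) := by
      rw [← ih]
      apply List.map_congr_left
      intro k _
      have : (sn + k) / sn = k / sn + 1 := by
        rw [Nat.add_comm, Nat.add_div_right _ hs]
      simp [Function.comp, this]
    rw [h1, h2, List.flatMap_cons]

-- Int wrapper: B's row over pyRange/pyGetD/floordiv equals the flatMap-replicate form, 0 < s.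
lemma key_int {α β : Type} [Inhabited α] (g : α → β) (s : Int) (hs : 0 < s) (d : α) (L : List α) :
    (PySem.List.pyRange 0 ((L.length : Int) * s) 1).map
        (fun i => g (PySem.List.pyGetD L (PySem.Int.floordiv i s) d))
      = L.flatMap (fun c => List.replicate s.toNat (g c)) := by
  have hsn : s = (s.toNat : Int) := (Int.toNat_of_nonneg hs.le).symm
  have hmul : (L.length : Int) * s = ((L.length * s.toNat : Nat) : Int) := by
    rw [Int.natCast_mul, Int.toNat_of_nonneg hs.le]
  rw [hmul, PySem.List.pyRange_zero_nat, List.map_map]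
  rw [← key_nat g s.toNat (by omega) d L]
  apply List.map_congr_left
  intro k _
  have : PySem.Int.floordiv (k : Int) s = ((k / s.toNat : Nat) : Int) := by
    rw [hsn]; exact PySem.Int.floordiv_natCast k s.toNat
  simp only [Function.comp]
  rw [this, PySem.List.pyGetD_natCast]

-- ===== VERDICT (by name: the statement is the Claim_ definition above) =====
theorem scale_with_colour_map_spec : Claim_equal_scale_with_colour_map := by
  intro grid s cmap _
  unfold Spec_scale_with_colour_map
  simp only [scale_with_colour_map, scale_with_colour_map_alt]
  by_cases hs : 0 < s
  · rw [grid_fold_eq]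
    simp only [row_fold_eq, List.nil_append]
    have h2 := key_int (fun c => (PySem.Dict.ofList cmap).getD c c) s hs 0
    simp only [h2]
    exact (key_int (fun row : List Int =>
      row.flatMap (fun c => List.replicate s.toNat ((PySem.Dict.ofList cmap).getD c c)))
      s hs ([] : List Int) grid).symm
  · have h0 : s.toNat = 0 := by omega
    have hle : (grid.length : Int) * s ≤ 0 :=
      mul_nonpos_of_nonneg_of_nonpos (by positivity) (by omega)
    rw [grid_fold_eq]
    simp [h0, PySem.List.pyRange_one_eq_nil hle]
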